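-- pv_equiv track=rewrite | github.com/UnstableBlob/BugAuction | bugs/global_instead_of_local/main.py | sponge_squeeze
-- ===== SOURCE A (Python) =====
-- def sponge_squeeze(lanes, length=1):
--     result = []
--     for i in range(length):
--         v = lanes[i % len(lanes)]
--         v ^= v >> 17
--         v = (v * 0xBF58476D1CE4E5B9) & 0xFFFFFFFFFFFFFFFF
--         result.append(v)
--     return result
-- ===== SOURCE B (Python) =====
-- def sponge_squeeze(lanes, length=1):
--     table = []
--     for x in lanes:
--         v = x ^ (x >> 17)
--         table.append((v * 0xBF58476D1CE4E5B9) & 0xFFFFFFFFFFFFFFFF)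
--     return [table[i % len(table)] for i in range(length)]
-- ===== Notes on version B (the rewrite author's own statement) =====
-- stated objective: alternative
-- what changed: B precomputes the hash of every lane once into a table, then fills the output by cyclically indexing that table, instead of recomputing the hash inside the output loop as A does.
import Mathlib
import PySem

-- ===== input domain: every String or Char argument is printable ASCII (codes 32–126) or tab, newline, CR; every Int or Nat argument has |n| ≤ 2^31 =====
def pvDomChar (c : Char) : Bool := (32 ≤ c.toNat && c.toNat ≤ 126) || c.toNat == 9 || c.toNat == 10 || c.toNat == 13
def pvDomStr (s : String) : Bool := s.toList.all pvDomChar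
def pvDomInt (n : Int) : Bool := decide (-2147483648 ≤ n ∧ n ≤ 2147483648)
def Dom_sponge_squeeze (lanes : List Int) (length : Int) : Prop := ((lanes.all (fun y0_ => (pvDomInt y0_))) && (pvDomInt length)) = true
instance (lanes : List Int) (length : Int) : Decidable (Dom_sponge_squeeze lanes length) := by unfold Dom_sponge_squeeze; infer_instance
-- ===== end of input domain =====

-- B precomputes each lane's hash once into a table and fills the output by cyclic indexing
-- (alternative decomposition; equivalence of return values proved on Pre_).


-- ===== PORT A =====
def sponge_squeeze (lanes : List Int) (length : Int) : List Int :=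
  (PySem.List.pyRange 0 length 1).foldl (fun result i =>
    let v := (PySem.List.pyGet? lanes (PySem.Int.mod i (lanes.length : Int))).getD 0
    let v := PySem.Int.bxor v (v >>> (17 : Nat))
    let v := PySem.Int.band (v * 0xBF58476D1CE4E5B9) 0xFFFFFFFFFFFFFFFF
    result ++ [v]) []

-- ===== PORT B =====
def pvHash (x : Int) : Int :=
  let v := PySem.Int.bxor x (x >>> (17 : Nat))
  PySem.Int.band (v * 0xBF58476D1CE4E5B9) 0xFFFFFFFFFFFFFFFF

def sponge_squeeze_alt (lanes : List Int) (length : Int) : List Int :=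
  let table := lanes.map pvHash
  (PySem.List.pyRange 0 length 1).map (fun i =>
    (PySem.List.pyGet? table (PySem.Int.mod i (table.length : Int))).getD 0)

-- ===== PRECONDITION & SPEC =====
-- Pre_ excludes exactly the inputs where Python A raises ZeroDivisionError: empty lanes with length > 0.
def Pre_sponge_squeeze (lanes : List Int) (length : Int) : Prop := lanes ≠ [] ∨ length ≤ 0
instance (lanes : List Int) (length : Int) : Decidable (Pre_sponge_squeeze lanes length) := by unfold Pre_sponge_squeeze; infer_instance
def pvWitness_sponge_squeeze : List Int × Int := ([1, 2, 3], 5)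
def Spec_sponge_squeeze (lanes : List Int) (length : Int) (out : List Int) : Prop := out = sponge_squeeze_alt lanes length
instance (lanes : List Int) (length : Int) (out : List Int) : Decidable (Spec_sponge_squeeze lanes length out) := by unfold Spec_sponge_squeeze; infer_instance

-- ===== CLAIM (what is proved, stated in full; the proofs are below) =====
def Claim_equal_sponge_squeeze : Prop := ∀ (lanes : List Int) (length : Int), Dom_sponge_squeeze lanes length → Pre_sponge_squeeze lanes length → Spec_sponge_squeeze lanes length (sponge_squeeze lanes length)

-- ===== LEMMAS AND PROOFS =====
theorem pv_foldl_append {α β : Type} (f : α → β) :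
    ∀ (l : List α) (acc : List β),
      l.foldl (fun r i => r ++ [f i]) acc = acc ++ l.map f := by
  intro l
  induction l with
  | nil => intro acc; simp
  | cons x xs ih => intro acc; simp [List.foldl, ih]

theorem pv_body_eq (lanes : List Int) (hne : lanes ≠ []) (i : Int) :
    ((PySem.List.pyGet? (lanes.map pvHash)
        (PySem.Int.mod i ((lanes.map pvHash).length : Int))).getD 0)
    = (fun v =>
        PySem.Int.band
          (PySem.Int.bxor v (v >>> (17 : Nat)) * 0xBF58476D1CE4E5B9)
          0xFFFFFFFFFFFFFFFF)
        ((PySem.List.pyGet? lanes (PySem.Int.mod i (lanes.length : Int))).getD 0) := by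
  have hlen : 0 < (lanes.length : Int) := by
    have : lanes.length ≠ 0 := by simpa [List.length_eq_zero_iff] using hne
    omega
  have h0 : 0 ≤ PySem.Int.mod i (lanes.length : Int) := PySem.Int.mod_nonneg i hlen
  have h1 : PySem.Int.mod i (lanes.length : Int) < (lanes.length : Int) :=
    PySem.Int.mod_lt i hlen
  rw [List.length_map,
      PySem.List.pyGet?_eq_some_getElem (lanes.map pvHash) h0 (by simpa using h1),
      PySem.List.pyGet?_eq_some_getElem lanes h0 h1]
  simp [pvHash]

theorem sponge_squeeze_spec_aux (lanes : List Int) (length : Int)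
    (hpre : Pre_sponge_squeeze lanes length) :
    sponge_squeeze lanes length = sponge_squeeze_alt lanes length := by
  by_cases hne : lanes = []
  · have hle : length ≤ 0 := by
      rcases hpre with h | h
      · exact absurd hne h
      · exact h
    simp [sponge_squeeze, sponge_squeeze_alt, PySem.List.pyRange_one_eq_nil (by omega : length ≤ 0)]
  · unfold sponge_squeeze sponge_squeeze_alt
    rw [pv_foldl_append]
    simp only [List.nil_append]
    refine List.map_congr_left ?_
    intro i _
    exact (pv_body_eq lanes hne i).symm

-- ===== VERDICT (by name: the statement is the Claim_ definition above) =====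
theorem sponge_squeeze_spec : Claim_equal_sponge_squeeze := by
  intro lanes length _ hpre
  exact sponge_squeeze_spec_aux lanes length hpre
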